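-- pv_equiv track=rewrite | github.com/EarthTan/tool-documentsConverter | tools/ball_valume_one.py | format_grouped_truncated
-- ===== SOURCE A (Python) =====
-- def format_grouped_truncated(y_scaled: int, N: int) -> str:
--     if N == 0:
--         return "0.\n"
--     frac = str(y_scaled).rjust(N, "0")
--     groups = [frac[i:i+4] for i in range(0, N, 4)]
--     lines = []
--     for i in range(0, len(groups), 2):
--         lines.append((" ".join(groups[i:i+2])).rstrip())
--     return "0.\n" + "\n".join(lines) + "\n"
-- ===== SOURCE B (Python) =====
-- def format_grouped_truncated(y_scaled: int, N: int) -> str: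
--     if N == 0:
--         return "0.\n"
--     frac = str(y_scaled).rjust(N, "0")
--     lines = [frac[i:i+4] + " " + frac[i+4:i+8] if i + 4 < N else frac[i:i+4]
--              for i in range(0, N, 8)]
--     return "0.\n" + "\n".join(lines) + "\n"
-- ===== Notes on version B (the rewrite author's own statement) =====
-- stated objective: simpler
-- what changed: Replaces A's two passes (build a list of 4-char groups, then a second loop pairing adjacent groups with join+rstrip) by a single comprehension that steps through the padded string 8 characters at a time and slices each line directly; the intermediate groups list, the join and the rstrip disappear.
import Mathlib
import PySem

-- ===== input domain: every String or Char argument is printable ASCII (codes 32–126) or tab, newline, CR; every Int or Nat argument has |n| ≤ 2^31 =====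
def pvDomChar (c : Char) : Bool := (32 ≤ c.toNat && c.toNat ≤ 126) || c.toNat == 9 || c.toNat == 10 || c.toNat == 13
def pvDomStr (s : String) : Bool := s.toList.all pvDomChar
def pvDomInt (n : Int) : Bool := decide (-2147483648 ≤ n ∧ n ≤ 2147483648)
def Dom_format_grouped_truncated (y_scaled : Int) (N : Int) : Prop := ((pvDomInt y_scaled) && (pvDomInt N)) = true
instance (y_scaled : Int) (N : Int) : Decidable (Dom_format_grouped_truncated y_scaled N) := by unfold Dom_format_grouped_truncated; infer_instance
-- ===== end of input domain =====

-- B replaces A's two passes (group list, then pair-and-join loop with rstrip) by one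
-- comprehension stepping 8 chars at a time and slicing each line directly; same results.

-- shared builtin helper: str.rjust(w, fill) — left-pad to width w (exact hand port,
-- PySem has no rjust; no pad when w ≤ len; w.toNat handles w < 0 as Python does)
def pyRjust (cs : List Char) (w : Int) (fill : Char) : List Char :=
  List.replicate (w.toNat - cs.length) fill ++ cs

-- ===== PORT A =====
def format_grouped_truncated (y_scaled : Int) (N : Int) : String :=
  if N = 0 then "0.\n"
  else
    let frac := pyRjust (PySem.Int.toChars y_scaled) N '0'
    let groups := (PySem.List.pyRange 0 N 4).map
      (fun i => PySem.List.slice frac (some i) (some (i + 4)))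
    let lines := (PySem.List.pyRange 0 (groups.length : Int) 2).foldl
      (fun acc i => acc ++ [PySem.Chars.rstrip
        (PySem.Chars.join [' '] (PySem.List.slice groups (some i) (some (i + 2))))]) []
    String.ofList ('0' :: '.' :: '\n' :: (PySem.Chars.join ['\n'] lines ++ ['\n']))

-- ===== PORT B =====
def format_grouped_truncated_alt (y_scaled : Int) (N : Int) : String :=
  if N = 0 then "0.\n"
  else
    let frac := pyRjust (PySem.Int.toChars y_scaled) N '0'
    let lines := (PySem.List.pyRange 0 N 8).map (fun i =>
      if i + 4 < N then
        PySem.List.slice frac (some i) (some (i + 4)) ++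
          ' ' :: PySem.List.slice frac (some (i + 4)) (some (i + 8))
      else PySem.List.slice frac (some i) (some (i + 4)))
    String.ofList ('0' :: '.' :: '\n' :: (PySem.Chars.join ['\n'] lines ++ ['\n']))

-- ===== PRECONDITION & SPEC =====
def Spec_format_grouped_truncated (y_scaled : Int) (N : Int) (out : String) : Prop := out = format_grouped_truncated_alt y_scaled N
instance (y_scaled : Int) (N : Int) (out : String) : Decidable (Spec_format_grouped_truncated y_scaled N out) := by unfold Spec_format_grouped_truncated; infer_instance

-- ===== CLAIM (what is proved, stated in full; the proofs are below) =====
def Claim_equal_format_grouped_truncated : Prop := ∀ (y_scaled : Int) (N : Int), Dom_format_grouped_truncated y_scaled N → Spec_format_grouped_truncated y_scaled N (format_grouped_truncated y_scaled N)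

-- ===== LEMMAS AND PROOFS =====

lemma isspace_digitChar (k : Nat) : PySem.Chars.isspace (Nat.digitChar k) = false := by
  rcases Nat.lt_or_ge k 16 with h | h
  · interval_cases k <;> decide
  · have hd : Nat.digitChar k = '*' := by
      unfold Nat.digitChar
      repeat rw [if_neg (by omega)]
    rw [hd]; decide

lemma nonspace_toDigitsCore (b fuel n : Nat) (ds : List Char)
    (h : ∀ c ∈ ds, PySem.Chars.isspace c = false) :
    ∀ c ∈ Nat.toDigitsCore b fuel n ds, PySem.Chars.isspace c = false := by
  induction fuel generalizing n ds with
  | zero => simpa [Nat.toDigitsCore] using h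
  | succ f ih =>
    intro c hc
    rw [Nat.toDigitsCore] at hc
    by_cases hz : n / b = 0
    · simp only [hz] at hc
      rcases List.mem_cons.1 hc with rfl | hc
      · exact isspace_digitChar _
      · exact h c hc
    · simp only [hz] at hc
      refine ih _ _ (fun c' hc' => ?_) c hc
      rcases List.mem_cons.1 hc' with rfl | hc'
      · exact isspace_digitChar _
      · exact h c' hc'

lemma nonspace_toChars (n : Int) :
    ∀ c ∈ PySem.Int.toChars n, PySem.Chars.isspace c = false := by
  unfold PySem.Int.toChars
  split
  · intro c hc
    rcases List.mem_cons.1 hc with rfl | hc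
    · decide
    · exact nonspace_toDigitsCore _ _ _ _ (by simp) c hc
  · exact nonspace_toDigitsCore _ _ _ _ (by simp)

lemma nonspace_frac (y N : Int) :
    ∀ c ∈ pyRjust (PySem.Int.toChars y) N '0', PySem.Chars.isspace c = false := by
  intro c hc
  rcases List.mem_append.1 hc with hc | hc
  · rcases List.eq_of_mem_replicate hc with rfl; decide
  · exact nonspace_toChars y c hc

lemma length_pyRjust (cs : List Char) (w : Int) (fill : Char) :
    w.toNat ≤ (pyRjust cs w fill).length := by
  simp [pyRjust]; omega

lemma rstrip_concat (xs : List Char) (c : Char) (hc : PySem.Chars.isspace c = false) :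
    PySem.Chars.rstrip (xs ++ [c]) = xs ++ [c] := by
  simp [PySem.Chars.rstrip, hc]

lemma rstrip_append_of_last_nonspace (x y : List Char) (hy : y ≠ [])
    (h : ∀ c ∈ y, PySem.Chars.isspace c = false) :
    PySem.Chars.rstrip (x ++ y) = x ++ y := by
  rcases List.eq_nil_or_concat y with rfl | ⟨y', c, rfl⟩
  · exact absurd rfl hy
  · rw [List.concat_eq_append, ← List.append_assoc]
    exact rstrip_concat _ _ (h c (by simp))

lemma rstrip_of_nonspace (y : List Char)
    (h : ∀ c ∈ y, PySem.Chars.isspace c = false) :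
    PySem.Chars.rstrip y = y := by
  rcases List.eq_nil_or_concat y with rfl | ⟨y', c, rfl⟩
  · rfl
  · rw [List.concat_eq_append]; exact rstrip_concat _ _ (h c (by simp))

-- a generic slice with Int bounds equal to ↑j and ↑j + ↑m
lemma slice_nat' {α : Type} (xs : List α) (a b : Int) (j m : Nat)
    (ha : a = (j : Int)) (hb : b = (j : Int) + (m : Int)) :
    PySem.List.slice xs (some a) (some b) = (xs.drop j).take m := by
  rw [PySem.List.slice_toNat xs (by omega) (by omega)]
  have h2 : b.toNat - a.toNat = m := by omega
  have h1 : a.toNat = j := by omega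
  rw [h2, h1]

lemma take_two_drop {β : Type} (h : Nat → β) (g i : Nat) (hi : i < g) :
    (((List.range g).map h).drop i).take 2 =
      if i + 1 < g then [h i, h (i + 1)] else [h i] := by
  have hl : ((List.range g).map h).length = g := by simp
  rw [List.drop_eq_getElem_cons (by omega)]
  by_cases h2 : i + 1 < g
  · rw [List.drop_eq_getElem_cons (by omega)]
    simp [h2]
  · have hnil : ((List.range g).map h).drop (i + 1) = [] :=
      List.drop_eq_nil_of_le (by omega)
    simp [hnil, h2]

lemma pyRange_step_pos (g sn : Nat) (s : Int) (hs : s = (sn : Int)) (hs0 : 0 < sn)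
    (n : Nat) (hg : ((n : Int) + sn - 1) / sn = (g : Int)) (hn : 0 < n) :
    PySem.List.pyRange 0 (n : Int) s =
      (List.range g).map (fun k => ((sn * k : Nat) : Int)) := by
  subst hs
  rw [PySem.List.pyRange_of_pos 0 (n : Int) (by exact_mod_cast hs0)]
  rw [if_pos (by exact_mod_cast hn)]
  have hT : (((n : Int) - 0 + sn - 1) / sn).toNat = g := by
    rw [show (n : Int) - 0 + sn - 1 = (n : Int) + sn - 1 by ring, hg]; omega
  rw [hT]
  exact List.map_congr_left (fun k _ => by push_cast; ring)

-- the core: A's lines list equals B's lines list, for any frac covering the N digits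
lemma lines_eq (frac : List Char) (n : Nat) (hn : 0 < n) (hlen : n ≤ frac.length)
    (hns : ∀ c ∈ frac, PySem.Chars.isspace c = false) :
    (PySem.List.pyRange 0
        ((((PySem.List.pyRange 0 (n : Int) 4).map
            (fun i => PySem.List.slice frac (some i) (some (i + 4)))).length : Int)) 2).foldl
      (fun acc i => acc ++ [PySem.Chars.rstrip
        (PySem.Chars.join [' ']
          (PySem.List.slice ((PySem.List.pyRange 0 (n : Int) 4).map
            (fun i => PySem.List.slice frac (some i) (some (i + 4)))) (some i) (some (i + 2))))]) []
    = (PySem.List.pyRange 0 (n : Int) 8).map (fun i =>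
        if i + 4 < (n : Int) then
          PySem.List.slice frac (some i) (some (i + 4)) ++
            ' ' :: PySem.List.slice frac (some (i + 4)) (some (i + 8))
        else PySem.List.slice frac (some i) (some (i + 4))) := by
  have hr4 := pyRange_step_pos ((n + 3) / 4) 4 4 (by norm_num) (by norm_num) n (by omega) hn
  have hr8 := pyRange_step_pos ((n + 7) / 8) 8 8 (by norm_num) (by norm_num) n (by omega) hn
  set g := (n + 3) / 4 with hgdef
  set L := (n + 7) / 8 with hLdef
  rw [hr4, hr8, PySem.List.foldl_append_singleton_eq_map, List.nil_append]
  simp only [List.map_map, List.length_map, List.length_range]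
  have hr2 := pyRange_step_pos L 2 2 (by norm_num) (by norm_num) g
    (by rw [hgdef, hLdef]; omega) (by omega)
  rw [hr2, List.map_map]
  apply List.map_congr_left
  intro k hk
  have hkL : k < L := List.mem_range.1 hk
  have hk4 : 2 * k < g := by omega
  simp only [Function.comp_def]
  -- normalize the B side slices
  have hb1 : PySem.List.slice frac (some ((8 * k : Nat) : Int))
      (some (((8 * k : Nat) : Int) + 4)) = (frac.drop (8 * k)).take 4 :=
    slice_nat' _ _ _ (8 * k) 4 rfl (by push_cast; ring)
  have hb2 : PySem.List.slice frac (some (((8 * k : Nat) : Int) + 4))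
      (some (((8 * k : Nat) : Int) + 8)) = (frac.drop (8 * k + 4)).take 4 :=
    slice_nat' _ _ _ (8 * k + 4) 4 (by push_cast; ring) (by push_cast; ring)
  -- the A side: slice of the groups list
  have hsl : PySem.List.slice ((List.range g).map
        (fun x => PySem.List.slice frac (some ((4 * x : Nat) : Int))
          (some (((4 * x : Nat) : Int) + 4)))) (some ((2 * k : Nat) : Int))
        (some (((2 * k : Nat) : Int) + 2)) =
      ((((List.range g).map (fun x => PySem.List.slice frac (some ((4 * x : Nat) : Int))
        (some (((4 * x : Nat) : Int) + 4)))).drop (2 * k)).take 2) :=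
    slice_nat' _ _ _ (2 * k) 2 rfl (by push_cast; ring)
  rw [hsl, take_two_drop _ g (2 * k) hk4]
  have hgrp : ∀ j : Nat, PySem.List.slice frac (some ((4 * j : Nat) : Int))
      (some (((4 * j : Nat) : Int) + 4)) = (frac.drop (4 * j)).take 4 := fun j =>
    slice_nat' _ _ _ (4 * j) 4 rfl (by push_cast; ring)
  have hne : ∀ j : Nat, j < n → (frac.drop j).take 4 ≠ [] := by
    intro j hj hnil
    have := congrArg List.length hnil
    simp at this
    omega
  have hmem : ∀ j : Nat, ∀ c ∈ (frac.drop j).take 4, PySem.Chars.isspace c = false :=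
    fun j c hc => hns c (List.mem_of_mem_drop (List.mem_of_mem_take hc))
  by_cases hc : 8 * k + 4 < n
  · have hA : 2 * k + 1 < g := by omega
    rw [if_pos hA, if_pos (by push_cast; omega), hb1, hb2, hgrp, hgrp,
      PySem.Chars.join_cons_cons, PySem.Chars.join_singleton,
      show 4 * (2 * k) = 8 * k by ring, show 4 * (2 * k + 1) = 8 * k + 4 by ring,
      rstrip_append_of_last_nonspace _ _ (hne _ hc) (hmem _)]
    simp
  · have hA : ¬ (2 * k + 1 < g) := by omega
    rw [if_neg hA, if_neg (by push_cast; omega), hb1, hgrp,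
      PySem.Chars.join_singleton, show 4 * (2 * k) = 8 * k by ring]
    exact rstrip_of_nonspace _ (hmem _)

-- ===== VERDICT (by name: the statement is the Claim_ definition above) =====
theorem format_grouped_truncated_spec : Claim_equal_format_grouped_truncated := by
  intro y N _
  unfold Spec_format_grouped_truncated
  unfold format_grouped_truncated format_grouped_truncated_alt
  by_cases h0 : N = 0
  · simp [h0]
  rw [if_neg h0, if_neg h0]
  rcases lt_or_gt_of_ne h0 with hneg | hpos
  · have h4 : PySem.List.pyRange 0 N 4 = [] := by
      rw [PySem.List.pyRange_of_pos 0 N (by norm_num)]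
      rw [if_neg (by omega : ¬ (0:Int) < N)]; rfl
    have h8 : PySem.List.pyRange 0 N 8 = [] := by
      rw [PySem.List.pyRange_of_pos 0 N (by norm_num)]
      rw [if_neg (by omega : ¬ (0:Int) < N)]; rfl
    have h2 : PySem.List.pyRange (0:Int) (0:Int) 2 = [] := by
      rw [PySem.List.pyRange_of_pos ((0:Int)) ((0:Int)) (by norm_num)]
      rw [if_neg (by omega : ¬ ((0:Int)) < ((0:Int)))]; rfl
    simp [h4, h8, h2, PySem.Chars.join]
  · obtain ⟨n, rfl⟩ : ∃ n : Nat, N = (n : Int) :=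
      ⟨N.toNat, (Int.toNat_of_nonneg hpos.le).symm⟩
    have hn : 0 < n := by exact_mod_cast hpos
    have hlen : n ≤ (pyRjust (PySem.Int.toChars y) (n : Int) '0').length := by
      have := length_pyRjust (PySem.Int.toChars y) (n : Int) '0'
      omega
    exact congrArg (fun l => String.ofList
        ('0' :: '.' :: '\n' :: (PySem.Chars.join ['\n'] l ++ ['\n'])))
      (lines_eq (pyRjust (PySem.Int.toChars y) (n : Int) '0') n hn hlen
        (nonspace_frac y (n : Int)))
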